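-- pv_equiv track=rewrite | github.com/fullstackDEVH/auto_create_tasks_work_flow | lib.py | split_images_by_n_task
-- ===== SOURCE A (Python) =====
-- from typing import Dict, List
-- import math
--
-- def split_images_by_n_task(data_each_batchs: Dict, n_task: int):
--     dataset_tmp: Dict = {}
--     for batch_name, values_by_batch in data_each_batchs.items():
--         total_img_by_batch = len(values_by_batch)
--         image_each_part = math.ceil(total_img_by_batch / n_task)
--
--         for index in range(n_task):
--             end_index = (index + 1) * image_each_part
--             start_index = end_index - image_each_part
--
--             sliced_dict = {
--                 k: values_by_batch[k]
--                 for k in list(values_by_batch.keys())[start_index:end_index]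
--             }
--             dataset_name = f"DATASET-{index+1}"
--
--             if dataset_name not in dataset_tmp:
--                 dataset_tmp[dataset_name] = {}
--             if batch_name not in dataset_tmp[dataset_name]:
--                 dataset_tmp[dataset_name][batch_name] = {}
--             dataset_tmp[dataset_name][batch_name] = sliced_dict
--
--     return dataset_tmp
-- ===== SOURCE B (Python) =====
-- import math
--
--
-- def split_images_by_n_task(data_each_batchs, n_task):
--     # Scatter pass: pre-create every partition slot, then make ONE pass over the
--     # batch's items, placing item number i into partition i // image_each_part.
--     dataset_tmp = {}
--     for batch_name, values_by_batch in data_each_batchs.items():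
--         for index in range(n_task):
--             dataset_tmp.setdefault(f"DATASET-{index + 1}", {})[batch_name] = {}
--         if values_by_batch and n_task > 0:
--             image_each_part = math.ceil(len(values_by_batch) / n_task)
--             for i, (k, v) in enumerate(values_by_batch.items()):
--                 dataset_tmp[f"DATASET-{i // image_each_part + 1}"][batch_name][k] = v
--     return dataset_tmp
-- ===== Notes on version B (the rewrite author's own statement) =====
-- stated objective: alternative
-- what changed: B replaces A's n_task slice-building passes per batch (each re-listing the batch's keys and slicing [start:end]) by pre-creating all partition slots and then ONE scatter pass over enumerate(items) that buckets item i into partition i // image_each_part.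
import Mathlib
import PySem

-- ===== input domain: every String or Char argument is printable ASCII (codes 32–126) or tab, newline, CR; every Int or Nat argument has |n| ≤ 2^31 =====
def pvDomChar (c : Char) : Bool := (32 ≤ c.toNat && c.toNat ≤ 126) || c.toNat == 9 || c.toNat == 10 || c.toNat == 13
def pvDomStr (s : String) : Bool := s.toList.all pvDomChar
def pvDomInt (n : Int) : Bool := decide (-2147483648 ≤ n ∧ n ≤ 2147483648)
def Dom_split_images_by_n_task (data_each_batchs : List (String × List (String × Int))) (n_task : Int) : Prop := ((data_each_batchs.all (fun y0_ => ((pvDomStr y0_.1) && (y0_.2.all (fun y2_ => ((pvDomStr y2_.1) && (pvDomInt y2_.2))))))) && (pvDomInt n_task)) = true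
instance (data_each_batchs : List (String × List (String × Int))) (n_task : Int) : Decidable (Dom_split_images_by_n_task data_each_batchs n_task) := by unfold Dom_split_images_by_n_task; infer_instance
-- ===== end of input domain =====

-- B replaces A's n_task slice-building passes per batch by ONE scatter pass: it pre-creates every
-- partition slot and then places item number i directly into partition i // image_each_part
-- (objective: alternative — order-preserving bucketing by position instead of repeated slicing).


-- ===== PORT A =====
-- the nested dict type the Python builds
def pvDT : Type := PySem.Dict String (PySem.Dict String (PySem.Dict String Int))

-- math.ceil(a / b) as the exact rational ceiling -((-a) // b); equal to Python's float-based
-- ceil at the magnitudes involved here (a is a list length, |b| ≤ 2^31)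
def pvCeilDiv (a b : Int) : Int := -(PySem.Int.floordiv (-a) b)

-- body of A's inner 'for index in range(n_task)' loop
def pvStepIdxA (batch_name : String) (values_by_batch : List (String × Int))
    (image_each_part : Int) (dt : pvDT) (index : Int) : pvDT :=
  let end_index := (index + 1) * image_each_part
  let start_index := end_index - image_each_part
  let sliced_dict : PySem.Dict String Int :=
    (PySem.List.slice (values_by_batch.map Prod.fst) (some start_index) (some end_index)).foldl
      (fun sd k => sd.insert k (PySem.Dict.getD ⟨values_by_batch⟩ k 0)) PySem.Dict.empty
  let dataset_name := "DATASET-" ++ PySem.Int.toStr (index + 1)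
  let dt1 := if dt.contains dataset_name then dt else dt.insert dataset_name PySem.Dict.empty
  let inner := dt1.getD dataset_name PySem.Dict.empty
  let dt2 := if inner.contains batch_name then dt1
             else dt1.insert dataset_name (inner.insert batch_name PySem.Dict.empty)
  let inner2 := dt2.getD dataset_name PySem.Dict.empty
  dt2.insert dataset_name (inner2.insert batch_name sliced_dict)

-- body of A's outer 'for batch_name, values_by_batch in data_each_batchs.items()' loop
def pvStepBatchA (n_task : Int) (dataset_tmp : pvDT) (bv : String × List (String × Int)) : pvDT :=
  let total_img_by_batch : Int := PySem.List.len bv.2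
  let image_each_part := pvCeilDiv total_img_by_batch n_task
  (PySem.List.pyRange 0 n_task 1).foldl (pvStepIdxA bv.1 bv.2 image_each_part) dataset_tmp

-- harness boundary: the returned dict-of-dicts-of-dicts as nested association lists
def pvUnwrapDT (d : pvDT) : List (String × List (String × List (String × Int))) :=
  d.items.map (fun p => (p.1, p.2.items.map (fun q => (q.1, q.2.items))))

def split_images_by_n_task (data_each_batchs : List (String × List (String × Int))) (n_task : Int) :
    List (String × List (String × List (String × Int))) :=
  pvUnwrapDT (data_each_batchs.foldl (pvStepBatchA n_task) PySem.Dict.empty)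

-- ===== PORT B =====
-- body of B's 'for index in range(n_task)' pre-creation loop:
-- dataset_tmp.setdefault(f"DATASET-{index+1}", {})[batch_name] = {}
def pvStepSetd (batch_name : String) (dt : pvDT) (index : Int) : pvDT :=
  let name := "DATASET-" ++ PySem.Int.toStr (index + 1)
  dt.insert name ((dt.getD name PySem.Dict.empty).insert batch_name PySem.Dict.empty)

-- body of B's scatter loop: dataset_tmp[f"DATASET-{i // image_each_part + 1}"][batch_name][k] = v
def pvStepScat (batch_name : String) (image_each_part : Int) (dt : pvDT)
    (p : Int × (String × Int)) : pvDT :=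
  let name := "DATASET-" ++ PySem.Int.toStr (PySem.Int.floordiv p.1 image_each_part + 1)
  let inner := dt.getD name PySem.Dict.empty
  let innerbn := inner.getD batch_name PySem.Dict.empty
  dt.insert name (inner.insert batch_name (innerbn.insert p.2.1 p.2.2))

-- body of B's outer 'for batch_name, values_by_batch in data_each_batchs.items()' loop
def pvStepBatchB (n_task : Int) (dt : pvDT) (bv : String × List (String × Int)) : pvDT :=
  let dt1 := (PySem.List.pyRange 0 n_task 1).foldl (pvStepSetd bv.1) dt
  if bv.2 ≠ [] ∧ 0 < n_task then
    let image_each_part := pvCeilDiv (PySem.List.len bv.2) n_task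
    (PySem.List.enumerate bv.2).foldl (pvStepScat bv.1 image_each_part) dt1
  else dt1

def split_images_by_n_task_alt (data_each_batchs : List (String × List (String × Int))) (n_task : Int) :
    List (String × List (String × List (String × Int))) :=
  pvUnwrapDT (data_each_batchs.foldl (pvStepBatchB n_task) PySem.Dict.empty)

-- ===== PRECONDITION & SPEC =====
-- Pre_ excludes (a) association lists with a duplicate outer or inner key, which do not represent
-- a Python dict argument (the harness feeds dicts, whose keys are unique), and (b) n_task = 0 with
-- at least one batch, on which A raises ZeroDivisionError.
def Pre_split_images_by_n_task (data_each_batchs : List (String × List (String × Int))) (n_task : Int) : Prop :=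
  (data_each_batchs.map Prod.fst).Nodup ∧
  (∀ bv ∈ data_each_batchs, (bv.2.map Prod.fst).Nodup) ∧
  (data_each_batchs = [] ∨ n_task ≠ 0)
instance (data_each_batchs : List (String × List (String × Int))) (n_task : Int) : Decidable (Pre_split_images_by_n_task data_each_batchs n_task) := by unfold Pre_split_images_by_n_task; infer_instance

def pvWitness_split_images_by_n_task : (List (String × List (String × Int))) × Int :=
  ([("b1", [("k1", 1), ("k2", 2), ("k3", 3)]), ("b2", [("k1", 7)])], 2)

def Spec_split_images_by_n_task (data_each_batchs : List (String × List (String × Int))) (n_task : Int) (out : List (String × List (String × List (String × Int)))) : Prop := out = split_images_by_n_task_alt data_each_batchs n_task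
instance (data_each_batchs : List (String × List (String × Int))) (n_task : Int) (out : List (String × List (String × List (String × Int)))) : Decidable (Spec_split_images_by_n_task data_each_batchs n_task out) := by unfold Spec_split_images_by_n_task; infer_instance

-- ===== CLAIM (what is proved, stated in full; the proofs are below) =====
def Claim_equal_split_images_by_n_task : Prop := ∀ (data_each_batchs : List (String × List (String × Int))) (n_task : Int), Dom_split_images_by_n_task data_each_batchs n_task → Pre_split_images_by_n_task data_each_batchs n_task → Spec_split_images_by_n_task data_each_batchs n_task (split_images_by_n_task data_each_batchs n_task)
-- ===== LEMMAS AND PROOFS =====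

-- the DATASET name of partition index i
def pvName (i : Int) : String := "DATASET-" ++ PySem.Int.toStr (i + 1)

-- A's sliced_dict for a batch with items vb, part size p, partition index i
def pvSliced (vb : List (String × Int)) (p i : Int) : PySem.Dict String Int :=
  (PySem.List.slice (vb.map Prod.fst) (some ((i + 1) * p - p)) (some ((i + 1) * p))).foldl
    (fun sd k => sd.insert k (PySem.Dict.getD ⟨vb⟩ k 0)) PySem.Dict.empty

-- the rows (batch_name, sliced dict) a dataset holds for the processed batches `pref`
def pvRow (n_task : Int) (pref : List (String × List (String × Int))) (i : Int) :
    List (String × PySem.Dict String Int) :=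
  pref.map (fun bv => (bv.1, pvSliced bv.2 (pvCeilDiv (PySem.List.len bv.2) n_task) i))

-- the inner dict a dataset holds after A has processed the batches `pref`
def pvInnerA (n_task : Int) (pref : List (String × List (String × Int))) (i : Int) :
    PySem.Dict String (PySem.Dict String Int) :=
  ⟨pvRow n_task pref i⟩

theorem pv_toDigitsCore_eq (f : Nat) : ∀ (n : Nat) (acc : List Char), 0 < n → n < f →
    Nat.toDigitsCore 10 f n acc = ((Nat.digits 10 n).map Nat.digitChar).reverse ++ acc := by
  induction f with
  | zero => intro n acc hn hf; omega
  | succ f ih =>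
    intro n acc hn hf
    rw [Nat.toDigitsCore]
    rw [Nat.digits_def' (by norm_num : 1 < 10) hn]
    by_cases h0 : n / 10 = 0
    · simp [h0]
    · simp only [h0]
      rw [ih (n / 10) _ (Nat.pos_of_ne_zero h0) (by omega)]
      simp

theorem pv_digitChar_inj : ∀ a < 10, ∀ b < 10, Nat.digitChar a = Nat.digitChar b → a = b := by decide

theorem pv_map_digitChar_inj : ∀ (l1 l2 : List Nat), (∀ x ∈ l1, x < 10) → (∀ x ∈ l2, x < 10) →
    l1.map Nat.digitChar = l2.map Nat.digitChar → l1 = l2 := by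
  intro l1
  induction l1 with
  | nil => intro l2 _ _ h; cases l2 <;> simp_all
  | cons a t iht =>
    intro l2 h1 h2 h
    cases l2 with
    | nil => simp_all
    | cons b t2 =>
      simp only [List.map_cons, List.cons.injEq] at h
      have ha := h1 a (by simp)
      have hb := h2 b (by simp)
      have : a = b := pv_digitChar_inj a ha b hb h.1
      subst this
      rw [iht t2 (fun x hx => h1 x (by simp [hx])) (fun x hx => h2 x (by simp [hx])) h.2]

theorem pv_name_inj {i j : Int} (hi : 0 ≤ i) (hj : 0 ≤ j) (h : pvName i = pvName j) : i = j := by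
  have h' := congrArg String.toList h
  simp only [pvName, String.toList_append, PySem.Int.toList_toStr] at h'
  have hc : PySem.Int.toChars (i + 1) = PySem.Int.toChars (j + 1) := List.append_cancel_left h'
  simp only [PySem.Int.toChars, if_neg (by omega : ¬ i + 1 < 0), if_neg (by omega : ¬ j + 1 < 0)] at hc
  rw [Nat.toDigits, Nat.toDigits] at hc
  rw [pv_toDigitsCore_eq _ _ _ (by omega) (by omega),
      pv_toDigitsCore_eq _ _ _ (by omega) (by omega)] at hc
  simp only [List.append_nil] at hc
  have hd := List.reverse_injective hc
  have hdg := pv_map_digitChar_inj _ _ (fun x hx => Nat.digits_lt_base (by norm_num) hx)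
    (fun x hx => Nat.digits_lt_base (by norm_num) hx) hd
  have := congrArg (Nat.ofDigits 10) hdg
  rw [Nat.ofDigits_digits, Nat.ofDigits_digits] at this
  omega

theorem pv_names_nodup (n : Int) : ((PySem.List.pyRange 0 n 1).map pvName).Nodup := by
  refine List.Nodup.map_on ?_ (PySem.List.nodup_pyRange_one 0 n)
  intro x hx y hy hxy
  rw [PySem.List.mem_pyRange_one] at hx hy
  exact pv_name_inj hx.1 hy.1 hxy

theorem pv_get?_mk_append {κ ν : Type} [BEq κ] [LawfulBEq κ] (pre : List (κ × ν)) (k : κ) (v : ν)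
    (suf : List (κ × ν)) (h : k ∉ pre.map Prod.fst) :
    (PySem.Dict.mk (pre ++ (k, v) :: suf)).get? k = some v := by
  induction pre with
  | nil => simp [PySem.Dict.get?_mk_cons]
  | cons p t ih =>
    simp only [List.map_cons, List.mem_cons, not_or] at h
    rw [List.cons_append, PySem.Dict.get?_mk_cons, if_neg (by simpa using Ne.symm h.1)]
    exact ih h.2

theorem pv_not_contains {ν : Type} (l : List (String × ν)) (k : String)
    (h : k ∉ l.map Prod.fst) : (PySem.Dict.mk l).contains k = false := by
  rw [PySem.Dict.contains]
  rw [List.any_eq_false]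
  intro q hq
  simp only [beq_iff_eq]
  intro hc; exact h (hc ▸ List.mem_map_of_mem hq)

theorem pv_ofList_nodup {κ ν : Type} [BEq κ] [LawfulBEq κ] (l : List (κ × ν))
    (h : (l.map Prod.fst).Nodup) : PySem.Dict.ofList l = PySem.Dict.mk l := by
  apply PySem.Dict.ext
  show (l.foldl (fun acc p => acc.insert p.1 p.2) PySem.Dict.empty).items = l
  rw [PySem.Dict.items_foldl_insert_fresh l Prod.fst Prod.snd _ (fun a _ => rfl) h]
  simp [PySem.Dict.empty]

theorem pv_slice_map {α β : Type} (f : α → β) (xs : List α) (a b : Int) :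
    PySem.List.slice (xs.map f) (some a) (some b) = (PySem.List.slice xs (some a) (some b)).map f := by
  simp [PySem.List.slice, PySem.List.clampIdx]

theorem pv_slice_sublist {α : Type} (xs : List α) (a b : Int) :
    (PySem.List.slice xs (some a) (some b)).Sublist xs :=
  (List.take_sublist _ _).trans (List.drop_sublist _ _)

theorem pv_sliced_eq (vb : List (String × Int)) (p i : Int) (hnd : (vb.map Prod.fst).Nodup) :
    pvSliced vb p i = PySem.Dict.ofList (PySem.List.slice vb (some (i * p)) (some (i * p + p))) := by
  have he : (i + 1) * p - p = i * p := by ring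
  have he2 : (i + 1) * p = i * p + p := by ring
  have hsub : (PySem.List.slice vb (some (i * p)) (some (i * p + p))).Sublist vb := pv_slice_sublist _ _ _
  have hnds : ((PySem.List.slice vb (some (i * p)) (some (i * p + p))).map Prod.fst).Nodup :=
    hnd.sublist (hsub.map _)
  rw [pv_ofList_nodup _ hnds]
  unfold pvSliced
  rw [he, he2, pv_slice_map, List.foldl_map]
  apply PySem.Dict.ext
  rw [PySem.Dict.items_foldl_insert_fresh _ Prod.fst (fun kv => PySem.Dict.getD ⟨vb⟩ kv.1 0) _
      (fun a _ => rfl) hnds]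
  show List.map _ _ = _
  conv_rhs => rw [← List.map_id (PySem.List.slice vb (some (i * p)) (some (i * p + p)))]
  apply List.map_congr_left
  intro kv hkv
  have hmem : (kv.1, kv.2) ∈ vb := by
    have := hsub.mem hkv; simpa using this
  have : PySem.Dict.getD (⟨vb⟩ : PySem.Dict String Int) kv.1 0 = kv.2 :=
    PySem.Dict.getD_of_mem_items ⟨vb⟩ hmem (by simpa [PySem.Dict.keys_mk] using hnd) 0
  simp [this]

theorem pv_insert_insert {κ ν : Type} [BEq κ] [LawfulBEq κ] (d : PySem.Dict κ ν) (k : κ) (v w : ν) :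
    (d.insert k v).insert k w = d.insert k w := by
  apply PySem.Dict.ext
  by_cases h : d.contains k = true
  · rw [PySem.Dict.items_insert_of_contains _ _ (by simp),
        PySem.Dict.items_insert_of_contains _ _ h, PySem.Dict.items_insert_of_contains _ _ h,
        List.map_map]
    apply List.map_congr_left
    intro p _
    by_cases hp : (p.1 == k) = true <;> simp [hp]
  · rw [Bool.not_eq_true] at h
    rw [PySem.Dict.items_insert_of_contains _ _ (by simp),
        PySem.Dict.items_insert_of_not_contains _ _ h, PySem.Dict.items_insert_of_not_contains _ _ h,
        List.map_append]
    congr 1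
    · conv_rhs => rw [← List.map_id d.items]
      apply List.map_congr_left
      intro p hp
      have : (p.1 == k) = false := by
        by_contra hc
        simp only [Bool.not_eq_false, beq_iff_eq] at hc
        have : d.contains k = true := by
          rw [PySem.Dict.contains]; exact List.any_eq_true.mpr ⟨p, hp, by simp [hc]⟩
        simp_all
      simp [this]
    · simp

theorem pv_stepIdxA_fresh (bn : String) (vb : List (String × Int)) (p : Int) (dt : pvDT) (i : Int)
    (h : dt.contains (pvName i) = false) :
    pvStepIdxA bn vb p dt i = dt.insert (pvName i) (PySem.Dict.mk [(bn, pvSliced vb p i)]) := by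
  show (let dt1 := if dt.contains (pvName i) then dt else dt.insert (pvName i) PySem.Dict.empty
        let inner := dt1.getD (pvName i) PySem.Dict.empty
        let dt2 := if inner.contains bn then dt1
                   else dt1.insert (pvName i) (inner.insert bn PySem.Dict.empty)
        let inner2 := dt2.getD (pvName i) PySem.Dict.empty
        dt2.insert (pvName i) (inner2.insert bn (pvSliced vb p i))) = _
  simp only [h, if_false, Bool.false_eq_true, PySem.Dict.getD_insert_self]
  rw [show (PySem.Dict.empty : PySem.Dict String (PySem.Dict String Int)).contains bn = false from rfl]
  simp only [Bool.false_eq_true, if_false, pv_insert_insert, PySem.Dict.getD_insert_self]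
  rfl

theorem pv_stepIdxA_present (bn : String) (vb : List (String × Int)) (p : Int) (dt : pvDT) (i : Int)
    (inn : PySem.Dict String (PySem.Dict String Int))
    (h : dt.get? (pvName i) = some inn) (hbn : inn.contains bn = false) :
    pvStepIdxA bn vb p dt i = dt.insert (pvName i) (inn.insert bn (pvSliced vb p i)) := by
  have hc : dt.contains (pvName i) = true := by
    rw [PySem.Dict.contains_eq_isSome_get?, h]; rfl
  show (let dt1 := if dt.contains (pvName i) then dt else dt.insert (pvName i) PySem.Dict.empty
        let inner := dt1.getD (pvName i) PySem.Dict.empty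
        let dt2 := if inner.contains bn then dt1
                   else dt1.insert (pvName i) (inner.insert bn PySem.Dict.empty)
        let inner2 := dt2.getD (pvName i) PySem.Dict.empty
        dt2.insert (pvName i) (inner2.insert bn (pvSliced vb p i))) = _
  simp only [hc, if_true, PySem.Dict.getD_eq_get?_getD, h, Option.getD_some]
  simp only [hbn, Bool.false_eq_true, if_false, PySem.Dict.get?_insert_self, Option.getD_some]
  rw [pv_insert_insert]
  congr 1
  rw [pv_insert_insert]

theorem pv_foldIdxA_fresh (bn : String) (vb : List (String × Int)) (p : Int) :
    ∀ (is : List Int) (dt : pvDT), (is.map pvName).Nodup →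
    (∀ i ∈ is, dt.contains (pvName i) = false) →
    (is.foldl (pvStepIdxA bn vb p) dt).items
      = dt.items ++ is.map (fun i => (pvName i, PySem.Dict.mk [(bn, pvSliced vb p i)])) := by
  intro is
  induction is with
  | nil => intro dt _ _; simp
  | cons i t ih =>
    intro dt hnd hf
    simp only [List.map_cons, List.nodup_cons] at hnd
    rw [List.foldl_cons, pv_stepIdxA_fresh bn vb p dt i (hf i (by simp))]
    rw [ih _ hnd.2 ?_]
    · rw [PySem.Dict.items_insert_of_not_contains _ _ (hf i (by simp))]
      simp
    · intro j hj
      rw [PySem.Dict.contains_insert]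
      have : (pvName j == pvName i) = false := by
        simp only [beq_eq_false_iff_ne, ne_eq]
        intro hc; exact hnd.1 (hc ▸ List.mem_map_of_mem hj)
      rw [this, Bool.false_or]
      exact hf j (by simp [hj])

theorem pv_foldIdxA_update (bn : String) (vb : List (String × Int)) (n_task : Int)
    (pref : List (String × List (String × Int))) (hbn : bn ∉ pref.map Prod.fst) :
    ∀ (is : List Int) (pre : List (String × PySem.Dict String (PySem.Dict String Int))),
    (is.map pvName).Nodup → (∀ i ∈ is, pvName i ∉ pre.map Prod.fst) →
    ((is.foldl (pvStepIdxA bn vb (pvCeilDiv (PySem.List.len vb) n_task))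
        (PySem.Dict.mk (pre ++ is.map (fun i => (pvName i, pvInnerA n_task pref i))))).items
      = pre ++ is.map (fun i => (pvName i, pvInnerA n_task (pref ++ [(bn, vb)]) i))) := by
  intro is
  induction is with
  | nil => intro pre _ _; simp
  | cons i t ih =>
    intro pre hnd hpre
    simp only [List.map_cons, List.nodup_cons] at hnd
    have hget : (PySem.Dict.mk (pre ++ (pvName i, pvInnerA n_task pref i)
        :: t.map (fun j => (pvName j, pvInnerA n_task pref j)))).get? (pvName i)
        = some (pvInnerA n_task pref i) :=
      pv_get?_mk_append pre _ _ _ (hpre i (by simp))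
    have hcontains : (pvInnerA n_task pref i).contains bn = false := by
      apply pv_not_contains
      simp only [pvRow, List.map_map]
      intro hc
      obtain ⟨bv, hbv, rfl⟩ := List.mem_map.mp hc
      exact hbn (List.mem_map_of_mem hbv)
    rw [List.map_cons, List.foldl_cons,
        pv_stepIdxA_present bn vb _ _ i _ hget hcontains]
    have hv : (pvInnerA n_task pref i).insert bn (pvSliced vb (pvCeilDiv (PySem.List.len vb) n_task) i)
        = pvInnerA n_task (pref ++ [(bn, vb)]) i := by
      apply PySem.Dict.ext
      rw [PySem.Dict.items_insert_of_not_contains _ _ hcontains]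
      simp [pvInnerA, pvRow]
    rw [hv]
    have hcontT : (PySem.Dict.mk (pre ++ (pvName i, pvInnerA n_task pref i)
        :: t.map (fun j => (pvName j, pvInnerA n_task pref j)))).contains (pvName i) = true := by
      rw [PySem.Dict.contains_eq_isSome_get?, hget]; rfl
    have hins : ((PySem.Dict.mk (pre ++ (pvName i, pvInnerA n_task pref i)
          :: t.map (fun j => (pvName j, pvInnerA n_task pref j)))).insert (pvName i)
          (pvInnerA n_task (pref ++ [(bn, vb)]) i))
        = PySem.Dict.mk ((pre ++ [(pvName i, pvInnerA n_task (pref ++ [(bn, vb)]) i)])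
            ++ t.map (fun j => (pvName j, pvInnerA n_task pref j))) := by
      apply PySem.Dict.ext
      rw [PySem.Dict.items_insert_of_contains _ _ hcontT]
      show List.map (fun q => if (q.1 == pvName i) = true
          then (pvName i, pvInnerA n_task (pref ++ [(bn, vb)]) i) else q) _ = _
      rw [List.map_append, List.map_cons]
      have h1 : List.map (fun q => if (q.1 == pvName i) = true
          then (pvName i, pvInnerA n_task (pref ++ [(bn, vb)]) i) else q) pre = pre := by
        conv_rhs => rw [← List.map_id pre]
        apply List.map_congr_left
        intro q hq
        rw [if_neg (fun hc => hpre i (by simp) (((beq_iff_eq (a := q.1) (b := pvName i)).mp hc) ▸ List.mem_map_of_mem hq))]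
        rfl
      have h2 : List.map (fun q => if (q.1 == pvName i) = true
          then (pvName i, pvInnerA n_task (pref ++ [(bn, vb)]) i) else q)
          (t.map (fun j => (pvName j, pvInnerA n_task pref j)))
          = t.map (fun j => (pvName j, pvInnerA n_task pref j)) := by
        conv_rhs => rw [← List.map_id (t.map (fun j => (pvName j, pvInnerA n_task pref j)))]
        apply List.map_congr_left
        intro q hq
        obtain ⟨j, hj, rfl⟩ := List.mem_map.mp hq
        rw [if_neg (fun hc => hnd.1 (((beq_iff_eq (a := pvName j) (b := pvName i)).mp hc) ▸ List.mem_map_of_mem hj))]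
        rfl
      rw [h1, h2]
      simp
    rw [hins]
    have := ih (pre ++ [(pvName i, pvInnerA n_task (pref ++ [(bn, vb)]) i)]) hnd.2 ?_
    · rw [this]; simp
    · intro j hj
      rw [List.map_append]
      simp only [List.mem_append, not_or]
      refine ⟨hpre j (by simp [hj]), ?_⟩
      simp only [List.map_cons, List.map_nil, List.mem_singleton]
      intro hc; exact hnd.1 (hc ▸ List.mem_map_of_mem hj)

theorem pv_A_char (n_task : Int) :
    ∀ (data : List (String × List (String × Int))), (data.map Prod.fst).Nodup →
    (data.foldl (pvStepBatchA n_task) PySem.Dict.empty).items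
      = if data = [] then []
        else (PySem.List.pyRange 0 n_task 1).map (fun i => (pvName i, pvInnerA n_task data i)) := by
  intro data
  induction data using List.reverseRecOn with
  | nil => intro _; simp [PySem.Dict.empty]
  | append_singleton pref b ih =>
    intro hnd
    have hknd : (pref.map Prod.fst).Nodup ∧ b.1 ∉ pref.map Prod.fst := by
      rw [List.map_append, List.nodup_append] at hnd
      exact ⟨hnd.1, fun hc => hnd.2.2 b.1 hc b.1 (by simp) rfl⟩
    rw [List.foldl_append, List.foldl_cons, List.foldl_nil]
    rw [if_neg (by simp)]
    by_cases hp : pref = []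
    · subst hp
      rw [List.foldl_nil]
      show ((PySem.List.pyRange 0 n_task 1).foldl (pvStepIdxA b.1 b.2 _) PySem.Dict.empty).items = _
      rw [pv_foldIdxA_fresh _ _ _ _ _ (pv_names_nodup n_task) (fun _ _ => rfl)]
      simp [pvInnerA, pvRow, PySem.Dict.empty]
    · have hchar := ih hknd.1
      rw [if_neg hp] at hchar
      have : pref.foldl (pvStepBatchA n_task) PySem.Dict.empty
          = PySem.Dict.mk ((PySem.List.pyRange 0 n_task 1).map (fun i => (pvName i, pvInnerA n_task pref i))) :=
        PySem.Dict.ext hchar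
      rw [this]
      show ((PySem.List.pyRange 0 n_task 1).foldl (pvStepIdxA b.1 b.2 _) _).items = _
      have := pv_foldIdxA_update b.1 b.2 n_task pref hknd.2 (PySem.List.pyRange 0 n_task 1) []
        (pv_names_nodup n_task) (by simp)
      simp only [List.nil_append] at this
      rw [this]

-- ========== B-side characterisation ==========

-- the slice of the already-scattered prefix u that has landed in partition i
def pvChunk (u : List (String × Int)) (part i : Int) : List (String × Int) :=
  PySem.List.slice u (some (i * part)) (some (i * part + part))

-- B's full state while scattering batch bn (prefix u of its items placed), after batches pref
def pvStateB (n_task : Int) (pref : List (String × List (String × Int))) (bn : String)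
    (part : Int) (u : List (String × Int)) : pvDT :=
  ⟨(PySem.List.pyRange 0 n_task 1).map
    (fun i => (pvName i, PySem.Dict.mk (pvRow n_task pref i ++ [(bn, PySem.Dict.mk (pvChunk u part i))])))⟩

theorem pv_mk_map_get? (is : List Int) (g : Int → PySem.Dict String (PySem.Dict String Int))
    (i0 : Int) (h0 : i0 ∈ is) (hnd : (is.map pvName).Nodup) :
    (PySem.Dict.mk (is.map (fun i => (pvName i, g i)))).get? (pvName i0) = some (g i0) := by
  induction is with
  | nil => simp at h0
  | cons j t ih =>
    simp only [List.map_cons, List.nodup_cons] at hnd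
    rw [List.map_cons, PySem.Dict.get?_mk_cons]
    by_cases hj : (pvName j == pvName i0) = true
    · have hje : pvName j = pvName i0 := by simpa using hj
      rcases List.mem_cons.mp h0 with rfl | hmem
      · simp
      · exact absurd (hje ▸ List.mem_map_of_mem hmem) hnd.1
    · rw [if_neg hj]
      have : i0 ∈ t := by
        rcases List.mem_cons.mp h0 with rfl | hmem
        · simp at hj
        · exact hmem
      exact ih this hnd.2

theorem pv_mk_map_insert (is : List Int) (g : Int → PySem.Dict String (PySem.Dict String Int))
    (i0 : Int) (w : PySem.Dict String (PySem.Dict String Int)) (h0 : i0 ∈ is)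
    (hnd : (is.map pvName).Nodup) :
    (PySem.Dict.mk (is.map (fun i => (pvName i, g i)))).insert (pvName i0) w
      = PySem.Dict.mk (is.map (fun i => (pvName i, if i = i0 then w else g i))) := by
  have hc : (PySem.Dict.mk (is.map (fun i => (pvName i, g i)))).contains (pvName i0) = true := by
    rw [PySem.Dict.contains_eq_isSome_get?, pv_mk_map_get? is g i0 h0 hnd]; rfl
  apply PySem.Dict.ext
  rw [PySem.Dict.items_insert_of_contains _ _ hc]
  show List.map _ _ = List.map (fun i => (pvName i, if i = i0 then w else g i)) is
  rw [List.map_map]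
  apply List.map_congr_left
  intro i hi
  by_cases hii : i = i0
  · subst hii; simp [Function.comp]
  · have : (pvName i == pvName i0) = false := by
      simp only [beq_eq_false_iff_ne, ne_eq]
      intro hc'
      exact hii (List.inj_on_of_nodup_map hnd hi h0 hc')
    simp [Function.comp, this, hii]

theorem pv_insert_last {ν : Type} (pre : List (String × ν)) (bn : String) (S S' : ν)
    (h : bn ∉ pre.map Prod.fst) :
    (PySem.Dict.mk (pre ++ [(bn, S)])).insert bn S' = PySem.Dict.mk (pre ++ [(bn, S')]) := by
  have hc : (PySem.Dict.mk (pre ++ [(bn, S)])).contains bn = true := by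
    rw [PySem.Dict.contains_eq_isSome_get?, pv_get?_mk_append pre bn S [] h]; rfl
  apply PySem.Dict.ext
  rw [PySem.Dict.items_insert_of_contains _ _ hc]
  show List.map _ _ = _
  rw [List.map_append]
  congr 1
  · conv_rhs => rw [← List.map_id pre]
    apply List.map_congr_left
    intro q hq
    rw [if_neg (fun hc' => h (((beq_iff_eq (a := q.1) (b := bn)).mp hc') ▸ List.mem_map_of_mem hq))]
    rfl
  · simp

theorem pv_dt_append {α : Type} (u : List α) (x : α) (A L : Nat) :
    ((u ++ [x]).drop A).take L
      = (u.drop A).take L ++ (if A ≤ u.length ∧ u.length < A + L then [x] else []) := by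
  rw [List.drop_append, List.take_append]
  congr 1
  have hlen : (u.drop A).length = u.length - A := by simp
  split_ifs with h
  · have h1 : A - u.length = 0 := by omega
    have h2 : 1 ≤ L - (u.drop A).length := by omega
    rw [h1]
    simp only [List.drop_zero]
    cases hq : L - (u.drop A).length with
    | zero => omega
    | succ k => simp
  · rcases Nat.lt_or_ge u.length A with hA | hA
    · have : 1 ≤ A - u.length := by omega
      cases hq : A - u.length with
      | zero => omega
      | succ k => simp
    · have : L - (u.drop A).length = 0 := by omega
      rw [this]; simp

theorem pv_chunk_append (u : List (String × Int)) (x : String × Int) (part i : Int)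
    (hp : 0 < part) (hi : 0 ≤ i) :
    pvChunk (u ++ [x]) part i
      = pvChunk u part i
        ++ (if PySem.Int.floordiv (u.length : Int) part = i then [x] else []) := by
  have h1 : (0:Int) ≤ i * part := mul_nonneg hi hp.le
  have h2 : (0:Int) ≤ i * part + part := by linarith
  have hA : ((i * part).toNat : Int) = i * part := Int.toNat_of_nonneg h1
  have hB : ((i * part + part).toNat : Int) = i * part + part := Int.toNat_of_nonneg h2
  unfold pvChunk
  rw [PySem.List.slice_toNat _ h1 h2, PySem.List.slice_toNat _ h1 h2]
  rw [pv_dt_append]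
  congr 1
  have hAB : ((i * part).toNat : Int) ≤ ((i * part + part).toNat : Int) := by
    rw [hA, hB]; linarith
  have hone : (i + 1) * part = i * part + part := by ring
  by_cases hc : PySem.Int.floordiv (u.length : Int) part = i
  · have hb := (PySem.Int.floordiv_eq_iff_of_pos hp).mp hc
    have c1 : ((i * part).toNat : Int) ≤ (u.length : Int) := by rw [hA]; exact hb.1
    have c3 : (u.length : Int) < ((i * part + part).toNat : Int) := by
      rw [hB, ← hone]; exact hb.2
    rw [if_pos hc, if_pos (by omega)]
  · rw [if_neg hc, if_neg]
    intro hcon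
    apply hc
    rw [PySem.Int.floordiv_eq_iff_of_pos hp, hone]
    have c1 : ((i * part).toNat : Int) ≤ (u.length : Int) := by omega
    have c3 : (u.length : Int) < ((i * part + part).toNat : Int) := by omega
    rw [hA] at c1
    rw [hB] at c3
    exact ⟨c1, c3⟩

theorem pv_scat_step (n_task : Int) (pref : List (String × List (String × Int))) (bn : String)
    (part : Int) (u : List (String × Int)) (x : String × Int)
    (hp : 0 < part) (hm : (u.length : Int) < n_task * part)
    (hbn : bn ∉ pref.map Prod.fst) (hk : x.1 ∉ u.map Prod.fst) :
    pvStepScat bn part (pvStateB n_task pref bn part u) ((u.length : Int), x)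
      = pvStateB n_task pref bn part (u ++ [x]) := by
  have hb := (PySem.Int.floordiv_eq_iff_of_pos (a := (u.length : Int)) (q := PySem.Int.floordiv (u.length : Int) part) hp).mp rfl
  have hm0 : (0:Int) ≤ (u.length : Int) := Int.natCast_nonneg _
  have h0 : 0 ≤ PySem.Int.floordiv (u.length : Int) part := by nlinarith [hb.1, hb.2]
  have hlt : PySem.Int.floordiv (u.length : Int) part < n_task := by nlinarith [hb.1, hm]
  have hmem : PySem.Int.floordiv (u.length : Int) part ∈ PySem.List.pyRange 0 n_task 1 :=
    PySem.List.mem_pyRange_one.mpr ⟨h0, hlt⟩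
  have hnn := pv_names_nodup n_task
  have hbnrow : ∀ j : Int, bn ∉ (pvRow n_task pref j).map Prod.fst := by
    intro j
    simp only [pvRow, List.map_map]
    intro hc
    obtain ⟨bv, hbv, hbq⟩ := List.mem_map.mp hc
    exact hbn (hbq ▸ List.mem_map_of_mem hbv)
  have hget : (pvStateB n_task pref bn part u).getD
        (pvName (PySem.Int.floordiv (u.length : Int) part)) PySem.Dict.empty
      = PySem.Dict.mk (pvRow n_task pref (PySem.Int.floordiv (u.length : Int) part)
          ++ [(bn, PySem.Dict.mk (pvChunk u part (PySem.Int.floordiv (u.length : Int) part)))]) := by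
    rw [PySem.Dict.getD_eq_get?_getD]
    rw [show pvStateB n_task pref bn part u
        = PySem.Dict.mk ((PySem.List.pyRange 0 n_task 1).map
            (fun i => (pvName i, PySem.Dict.mk (pvRow n_task pref i
              ++ [(bn, PySem.Dict.mk (pvChunk u part i))])))) from rfl]
    rw [pv_mk_map_get? _ _ _ hmem hnn]
    rfl
  show (pvStateB n_task pref bn part u).insert (pvName (PySem.Int.floordiv (u.length : Int) part))
      (((pvStateB n_task pref bn part u).getD (pvName (PySem.Int.floordiv (u.length : Int) part)) PySem.Dict.empty).insert bn
        ((((pvStateB n_task pref bn part u).getD (pvName (PySem.Int.floordiv (u.length : Int) part)) PySem.Dict.empty).getD bn PySem.Dict.empty).insert x.1 x.2))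
      = pvStateB n_task pref bn part (u ++ [x])
  rw [hget]
  have hgbn : (PySem.Dict.mk (pvRow n_task pref (PySem.Int.floordiv (u.length : Int) part)
        ++ [(bn, PySem.Dict.mk (pvChunk u part (PySem.Int.floordiv (u.length : Int) part)))])).getD bn
        PySem.Dict.empty
      = PySem.Dict.mk (pvChunk u part (PySem.Int.floordiv (u.length : Int) part)) := by
    rw [PySem.Dict.getD_eq_get?_getD, pv_get?_mk_append _ _ _ _ (hbnrow _)]
    rfl
  rw [hgbn]
  have hxins : (PySem.Dict.mk (pvChunk u part (PySem.Int.floordiv (u.length : Int) part))).insert x.1 x.2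
      = PySem.Dict.mk (pvChunk u part (PySem.Int.floordiv (u.length : Int) part) ++ [(x.1, x.2)]) := by
    apply PySem.Dict.ext
    rw [PySem.Dict.items_insert_of_not_contains _ _ (pv_not_contains _ _ ?_)]
    intro hc
    obtain ⟨q, hq, hq1⟩ := List.mem_map.mp hc
    have : q ∈ u := (pv_slice_sublist u _ _).mem hq
    exact hk (hq1 ▸ List.mem_map_of_mem this)
  rw [hxins, pv_insert_last _ _ _ _ (hbnrow _)]
  rw [show pvStateB n_task pref bn part u
      = PySem.Dict.mk ((PySem.List.pyRange 0 n_task 1).map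
          (fun i => (pvName i, PySem.Dict.mk (pvRow n_task pref i
            ++ [(bn, PySem.Dict.mk (pvChunk u part i))])))) from rfl]
  rw [pv_mk_map_insert _ _ _ _ hmem hnn]
  show PySem.Dict.mk _ = PySem.Dict.mk _
  congr 1
  apply List.map_congr_left
  intro i hi
  have hi0 : 0 ≤ i := (PySem.List.mem_pyRange_one.mp hi).1
  rw [pv_chunk_append u x part i hp hi0]
  by_cases hii : i = PySem.Int.floordiv (u.length : Int) part
  · subst hii
    simp
  · rw [if_neg hii, if_neg (fun hc => hii hc.symm)]
    simp

theorem pv_scatter (n_task : Int) (pref : List (String × List (String × Int))) (bn : String)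
    (part : Int) (hp : 0 < part) (hbn : bn ∉ pref.map Prod.fst) :
    ∀ (u : List (String × Int)), (u.map Prod.fst).Nodup → (u.length : Int) ≤ n_task * part →
    (PySem.List.enumerate u).foldl (pvStepScat bn part) (pvStateB n_task pref bn part [])
      = pvStateB n_task pref bn part u := by
  intro u
  induction u using List.reverseRecOn with
  | nil => intro _ _; simp [PySem.List.enumerate]
  | append_singleton v x ih =>
    intro hnd hlen
    have hvnd : (v.map Prod.fst).Nodup := by
      rw [List.map_append, List.nodup_append] at hnd
      exact hnd.1
    have hvx : x.1 ∉ v.map Prod.fst := by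
      rw [List.map_append, List.nodup_append] at hnd
      exact fun hc => hnd.2.2 x.1 hc x.1 (by simp) rfl
    rw [PySem.List.enumerate_append, List.foldl_append]
    rw [ih hvnd (by simp at hlen ⊢; omega)]
    simp only [PySem.List.enumerate_cons, PySem.List.enumerate_nil, List.foldl_cons,
      List.foldl_nil, zero_add]
    exact pv_scat_step n_task pref bn part v x hp (by simp at hlen ⊢; omega) hbn hvx

theorem pv_foldSetd_fresh (bn : String) :
    ∀ (is : List Int) (dt : pvDT), (is.map pvName).Nodup →
    (∀ i ∈ is, dt.contains (pvName i) = false) →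
    (is.foldl (pvStepSetd bn) dt).items
      = dt.items ++ is.map (fun i => (pvName i, PySem.Dict.mk [(bn, PySem.Dict.empty)])) := by
  intro is
  induction is with
  | nil => intro dt _ _; simp
  | cons i t ih =>
    intro dt hnd hf
    simp only [List.map_cons, List.nodup_cons] at hnd
    have hstep : pvStepSetd bn dt i = dt.insert (pvName i) (PySem.Dict.mk [(bn, PySem.Dict.empty)]) := by
      show dt.insert (pvName i) ((dt.getD (pvName i) PySem.Dict.empty).insert bn PySem.Dict.empty) = _
      have hg : dt.getD (pvName i) PySem.Dict.empty = PySem.Dict.empty := by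
        rw [PySem.Dict.getD_eq_get?_getD]
        have hh := hf i (by simp)
        rw [PySem.Dict.contains_eq_isSome_get?] at hh
        cases hgo : dt.get? (pvName i) with
        | none => rfl
        | some v => rw [hgo] at hh; simp at hh
      rw [hg]
      rfl
    rw [List.foldl_cons, hstep]
    rw [ih _ hnd.2 ?_]
    · rw [PySem.Dict.items_insert_of_not_contains _ _ (hf i (by simp))]
      simp
    · intro j hj
      rw [PySem.Dict.contains_insert]
      have : (pvName j == pvName i) = false := by
        simp only [beq_eq_false_iff_ne, ne_eq]
        intro hc; exact hnd.1 (hc ▸ List.mem_map_of_mem hj)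
      rw [this, Bool.false_or]
      exact hf j (by simp [hj])

theorem pv_foldSetd_update (bn : String) (g : Int → PySem.Dict String (PySem.Dict String Int)) :
    ∀ (is : List Int) (pre : List (String × PySem.Dict String (PySem.Dict String Int))),
    (is.map pvName).Nodup → (∀ i ∈ is, pvName i ∉ pre.map Prod.fst) →
    ((is.foldl (pvStepSetd bn) (PySem.Dict.mk (pre ++ is.map (fun i => (pvName i, g i))))).items
      = pre ++ is.map (fun i => (pvName i, (g i).insert bn PySem.Dict.empty))) := by
  intro is
  induction is with
  | nil => intro pre _ _; simp
  | cons i t ih =>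
    intro pre hnd hpre
    simp only [List.map_cons, List.nodup_cons] at hnd
    have hget : (PySem.Dict.mk (pre ++ (pvName i, g i)
        :: t.map (fun j => (pvName j, g j)))).get? (pvName i) = some (g i) :=
      pv_get?_mk_append pre _ _ _ (hpre i (by simp))
    have hstep : pvStepSetd bn (PySem.Dict.mk (pre ++ (pvName i, g i)
          :: t.map (fun j => (pvName j, g j)))) i
        = (PySem.Dict.mk (pre ++ (pvName i, g i) :: t.map (fun j => (pvName j, g j)))).insert
            (pvName i) ((g i).insert bn PySem.Dict.empty) := by
      show (PySem.Dict.mk _).insert (pvName i)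
          (((PySem.Dict.mk (pre ++ (pvName i, g i) :: t.map (fun j => (pvName j, g j)))).getD
            (pvName i) PySem.Dict.empty).insert bn PySem.Dict.empty) = _
      rw [PySem.Dict.getD_eq_get?_getD, hget]
      rfl
    have hcontT : (PySem.Dict.mk (pre ++ (pvName i, g i)
        :: t.map (fun j => (pvName j, g j)))).contains (pvName i) = true := by
      rw [PySem.Dict.contains_eq_isSome_get?, hget]; rfl
    have hins : ((PySem.Dict.mk (pre ++ (pvName i, g i)
          :: t.map (fun j => (pvName j, g j)))).insert (pvName i) ((g i).insert bn PySem.Dict.empty))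
        = PySem.Dict.mk ((pre ++ [(pvName i, (g i).insert bn PySem.Dict.empty)])
            ++ t.map (fun j => (pvName j, g j))) := by
      apply PySem.Dict.ext
      rw [PySem.Dict.items_insert_of_contains _ _ hcontT]
      show List.map (fun q => if (q.1 == pvName i) = true
          then (pvName i, (g i).insert bn PySem.Dict.empty) else q) _ = _
      rw [List.map_append, List.map_cons]
      have h1 : List.map (fun q => if (q.1 == pvName i) = true
          then (pvName i, (g i).insert bn PySem.Dict.empty) else q) pre = pre := by
        conv_rhs => rw [← List.map_id pre]
        apply List.map_congr_left
        intro q hq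
        rw [if_neg (fun hc => hpre i (by simp) (((beq_iff_eq (a := q.1) (b := pvName i)).mp hc) ▸ List.mem_map_of_mem hq))]
        rfl
      have h2 : List.map (fun q => if (q.1 == pvName i) = true
          then (pvName i, (g i).insert bn PySem.Dict.empty) else q)
          (t.map (fun j => (pvName j, g j)))
          = t.map (fun j => (pvName j, g j)) := by
        conv_rhs => rw [← List.map_id (t.map (fun j => (pvName j, g j)))]
        apply List.map_congr_left
        intro q hq
        obtain ⟨j, hj, rfl⟩ := List.mem_map.mp hq
        rw [if_neg (fun hc => hnd.1 (((beq_iff_eq (a := pvName j) (b := pvName i)).mp hc) ▸ List.mem_map_of_mem hj))]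
        rfl
      rw [h1, h2]
      simp
    rw [List.map_cons, List.foldl_cons, hstep, hins]
    have := ih (pre ++ [(pvName i, (g i).insert bn PySem.Dict.empty)]) hnd.2 ?_
    · rw [this]; simp
    · intro j hj
      rw [List.map_append]
      simp only [List.mem_append, not_or]
      refine ⟨hpre j (by simp [hj]), ?_⟩
      simp only [List.map_cons, List.map_nil, List.mem_singleton]
      intro hc; exact hnd.1 (hc ▸ List.mem_map_of_mem hj)

theorem pv_sliced_nil (p i : Int) : pvSliced [] p i = PySem.Dict.empty := by
  unfold pvSliced
  simp [PySem.List.slice]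

theorem pv_chunk_nil (part i : Int) : pvChunk [] part i = [] := by
  simp [pvChunk, PySem.List.slice]

theorem pv_row_append (n_task : Int) (pref : List (String × List (String × Int)))
    (bn : String) (vb : List (String × Int)) (i : Int) :
    pvRow n_task (pref ++ [(bn, vb)]) i
      = pvRow n_task pref i ++ [(bn, pvSliced vb (pvCeilDiv (PySem.List.len vb) n_task) i)] := by
  simp [pvRow]

theorem pv_bn_notin_row (n_task : Int) (pref : List (String × List (String × Int)))
    (bn : String) (hbn : bn ∉ pref.map Prod.fst) (i : Int) :
    bn ∉ (pvRow n_task pref i).map Prod.fst := by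
  simp only [pvRow, List.map_map]
  intro hc
  obtain ⟨bv, hbv, hbq⟩ := List.mem_map.mp hc
  exact hbn (hbq ▸ List.mem_map_of_mem hbv)

theorem pv_phase2 (n_task : Int) (pref : List (String × List (String × Int)))
    (bn : String) (vb : List (String × Int)) (hn : 0 < n_task)
    (hbn : bn ∉ pref.map Prod.fst) (hvnd : (vb.map Prod.fst).Nodup) :
    (if vb ≠ [] ∧ 0 < n_task then
        (PySem.List.enumerate vb).foldl (pvStepScat bn (pvCeilDiv (PySem.List.len vb) n_task))
          (pvStateB n_task pref bn (pvCeilDiv (PySem.List.len vb) n_task) [])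
      else pvStateB n_task pref bn (pvCeilDiv (PySem.List.len vb) n_task) [])
      = PySem.Dict.mk ((PySem.List.pyRange 0 n_task 1).map
          (fun i => (pvName i, pvInnerA n_task (pref ++ [(bn, vb)]) i))) := by
  by_cases hvb : vb = []
  · subst hvb
    rw [if_neg (by simp)]
    show PySem.Dict.mk _ = PySem.Dict.mk _
    congr 1
    apply List.map_congr_left
    intro i _
    simp only [Prod.mk.injEq, true_and]
    show PySem.Dict.mk _ = pvInnerA n_task (pref ++ [(bn, [])]) i
    unfold pvInnerA
    rw [pv_row_append, pv_sliced_nil, pv_chunk_nil]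
    rfl
  · have hlen1 : (1:Int) ≤ PySem.List.len vb := by
      simp only [PySem.List.len]
      cases vb with
      | nil => exact absurd rfl hvb
      | cons a t => simp
    have hq := (PySem.Int.neg_floordiv_neg_eq_iff_of_pos
        (a := PySem.List.len vb) (q := pvCeilDiv (PySem.List.len vb) n_task) hn).mp rfl
    have hpart : 0 < pvCeilDiv (PySem.List.len vb) n_task := by nlinarith [hq.2]
    have hbound : (vb.length : Int) ≤ n_task * pvCeilDiv (PySem.List.len vb) n_task := by
      have := hq.2
      simp only [PySem.List.len] at this ⊢
      nlinarith [this]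
    rw [if_pos ⟨hvb, hn⟩]
    rw [pv_scatter n_task pref bn _ hpart hbn vb hvnd hbound]
    show PySem.Dict.mk _ = PySem.Dict.mk _
    congr 1
    apply List.map_congr_left
    intro i _
    simp only [Prod.mk.injEq, true_and]
    show PySem.Dict.mk _ = pvInnerA n_task (pref ++ [(bn, vb)]) i
    unfold pvInnerA
    rw [pv_row_append]
    congr 2
    have hslice := pv_sliced_eq vb (pvCeilDiv (PySem.List.len vb) n_task) i hvnd
    rw [hslice, pv_ofList_nodup]
    · rfl
    · exact hvnd.sublist ((pv_slice_sublist vb _ _).map _)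

theorem pv_B_batch (n_task : Int) (pref : List (String × List (String × Int)))
    (bn : String) (vb : List (String × Int)) (hn : 0 < n_task)
    (hbn : bn ∉ pref.map Prod.fst) (hvnd : (vb.map Prod.fst).Nodup) :
    pvStepBatchB n_task
      (PySem.Dict.mk ((PySem.List.pyRange 0 n_task 1).map (fun i => (pvName i, pvInnerA n_task pref i))))
      (bn, vb)
      = PySem.Dict.mk ((PySem.List.pyRange 0 n_task 1).map
          (fun i => (pvName i, pvInnerA n_task (pref ++ [(bn, vb)]) i))) := by
  have hdt1 : (PySem.List.pyRange 0 n_task 1).foldl (pvStepSetd bn)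
        (PySem.Dict.mk ((PySem.List.pyRange 0 n_task 1).map (fun i => (pvName i, pvInnerA n_task pref i))))
      = pvStateB n_task pref bn (pvCeilDiv (PySem.List.len vb) n_task) [] := by
    apply PySem.Dict.ext
    have := pv_foldSetd_update bn (pvInnerA n_task pref) (PySem.List.pyRange 0 n_task 1) []
      (pv_names_nodup n_task) (by simp)
    simp only [List.nil_append] at this
    rw [this]
    show _ = List.map _ _
    apply List.map_congr_left
    intro i _
    simp only [Prod.mk.injEq, true_and]
    apply PySem.Dict.ext
    simp only [pvInnerA]
    rw [PySem.Dict.items_insert_of_not_contains _ _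
      (pv_not_contains _ _ (pv_bn_notin_row n_task pref bn hbn i))]
    show pvRow n_task pref i ++ [(bn, PySem.Dict.empty)] = _
    rw [pv_chunk_nil]
    rfl
  show (if vb ≠ [] ∧ 0 < n_task then
          (PySem.List.enumerate vb).foldl (pvStepScat bn (pvCeilDiv (PySem.List.len vb) n_task))
            ((PySem.List.pyRange 0 n_task 1).foldl (pvStepSetd bn) _)
        else (PySem.List.pyRange 0 n_task 1).foldl (pvStepSetd bn) _) = _
  rw [hdt1]
  exact pv_phase2 n_task pref bn vb hn hbn hvnd

theorem pv_B_batch0 (n_task : Int) (bn : String) (vb : List (String × Int)) (hn : 0 < n_task)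
    (hvnd : (vb.map Prod.fst).Nodup) :
    pvStepBatchB n_task PySem.Dict.empty (bn, vb)
      = PySem.Dict.mk ((PySem.List.pyRange 0 n_task 1).map
          (fun i => (pvName i, pvInnerA n_task [(bn, vb)] i))) := by
  have hdt1 : (PySem.List.pyRange 0 n_task 1).foldl (pvStepSetd bn) PySem.Dict.empty
      = pvStateB n_task [] bn (pvCeilDiv (PySem.List.len vb) n_task) [] := by
    apply PySem.Dict.ext
    rw [pv_foldSetd_fresh bn (PySem.List.pyRange 0 n_task 1) PySem.Dict.empty
      (pv_names_nodup n_task) (fun _ _ => rfl)]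
    show _ ++ _ = List.map _ _
    rw [show (PySem.Dict.empty : pvDT).items = [] from rfl, List.nil_append]
    apply List.map_congr_left
    intro i _
    simp only [Prod.mk.injEq, true_and]
    rw [pv_chunk_nil]
    rfl
  show (if vb ≠ [] ∧ 0 < n_task then
          (PySem.List.enumerate vb).foldl (pvStepScat bn (pvCeilDiv (PySem.List.len vb) n_task))
            ((PySem.List.pyRange 0 n_task 1).foldl (pvStepSetd bn) _)
        else (PySem.List.pyRange 0 n_task 1).foldl (pvStepSetd bn) _) = _
  rw [hdt1]
  have := pv_phase2 n_task [] bn vb hn (by simp) hvnd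
  simpa using this

theorem pv_B_char (n_task : Int) (hn : 0 < n_task) :
    ∀ (data : List (String × List (String × Int))), (data.map Prod.fst).Nodup →
    (∀ bv ∈ data, (bv.2.map Prod.fst).Nodup) →
    (data.foldl (pvStepBatchB n_task) PySem.Dict.empty).items
      = if data = [] then []
        else (PySem.List.pyRange 0 n_task 1).map (fun i => (pvName i, pvInnerA n_task data i)) := by
  intro data
  induction data using List.reverseRecOn with
  | nil => intro _ _; simp [PySem.Dict.empty]
  | append_singleton pref b ih =>
    intro hnd hinn
    have hknd : (pref.map Prod.fst).Nodup ∧ b.1 ∉ pref.map Prod.fst := by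
      rw [List.map_append, List.nodup_append] at hnd
      exact ⟨hnd.1, fun hc => hnd.2.2 b.1 hc b.1 (by simp) rfl⟩
    have hbnd : (b.2.map Prod.fst).Nodup := hinn b (by simp)
    rw [List.foldl_append, List.foldl_cons, List.foldl_nil, if_neg (by simp)]
    by_cases hp : pref = []
    · subst hp
      rw [List.foldl_nil]
      rw [show b = (b.1, b.2) from rfl, pv_B_batch0 n_task b.1 b.2 hn hbnd]
      simp
    · have hchar := ih hknd.1 (fun bv hbv => hinn bv (by simp [hbv]))
      rw [if_neg hp] at hchar
      have : pref.foldl (pvStepBatchB n_task) PySem.Dict.empty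
          = PySem.Dict.mk ((PySem.List.pyRange 0 n_task 1).map (fun i => (pvName i, pvInnerA n_task pref i))) :=
        PySem.Dict.ext hchar
      rw [this, show b = (b.1, b.2) from rfl,
        pv_B_batch n_task pref b.1 b.2 hn hknd.2 hbnd]

theorem pv_B_nonpos (n_task : Int) (hn : n_task ≤ 0) (data : List (String × List (String × Int))) :
    data.foldl (pvStepBatchB n_task) PySem.Dict.empty = PySem.Dict.empty := by
  have hr : PySem.List.pyRange 0 n_task 1 = [] := by
    simp [PySem.List.pyRange]; omega
  have hstep : ∀ (dt : pvDT) (bv : String × List (String × Int)), pvStepBatchB n_task dt bv = dt := by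
    intro dt bv
    show (if bv.2 ≠ [] ∧ 0 < n_task then
            (PySem.List.enumerate bv.2).foldl (pvStepScat bv.1 (pvCeilDiv (PySem.List.len bv.2) n_task))
              ((PySem.List.pyRange 0 n_task 1).foldl (pvStepSetd bv.1) dt)
          else (PySem.List.pyRange 0 n_task 1).foldl (pvStepSetd bv.1) dt) = dt
    rw [hr, List.foldl_nil, if_neg (fun h => absurd h.2 (not_lt.mpr hn))]
  induction data with
  | nil => rfl
  | cons h t ih => rw [List.foldl_cons, hstep]; exact ih

-- ===== VERDICT (by name: the statement is the Claim_ definition above) =====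
theorem split_images_by_n_task_spec : Claim_equal_split_images_by_n_task := by
  intro data n _ hpre
  unfold Spec_split_images_by_n_task
  unfold split_images_by_n_task split_images_by_n_task_alt
  obtain ⟨h1, h2, h3⟩ := hpre
  by_cases hd : data = []
  · subst hd; rfl
  · have hn0 : n ≠ 0 := h3.resolve_left hd
    rcases lt_or_gt_of_ne hn0 with hneg | hpos
    · have hA := pv_A_char n data h1
      rw [if_neg hd] at hA
      have hr : PySem.List.pyRange 0 n 1 = [] := by
        simp [PySem.List.pyRange]; omega
      rw [hr, List.map_nil] at hA
      have hB := pv_B_nonpos n (le_of_lt hneg) data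
      unfold pvUnwrapDT
      rw [hA, hB]
      rfl
    · have hA := pv_A_char n data h1
      rw [if_neg hd] at hA
      have hB := pv_B_char n hpos data h1 h2
      rw [if_neg hd] at hB
      unfold pvUnwrapDT
      rw [hA, hB]
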